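-- pv_equiv track=rewrite | github.com/Tejapusarla-13/python_practice | Loops_Excercises/loops_22.py | largest_smallest
-- ===== SOURCE A (Python) =====
-- def largest_smallest(num):
--     s_num=str(abs(num))
--     largest=int(s_num[0])
--     smallest=int(s_num[0])
--
--     for i in s_num[1:]:
--         if largest<int(i):
--             largest=int(i)
--         if smallest>int(i):
--             smallest=int(i)
--
--     str1=f"the largest digit in {num} is {largest}"
--     str2=f"the smallest digit in {num} is {smallest}"
--
--     return str1,str2
-- ===== SOURCE B (Python) =====
-- def largest_smallest(num):
--     digits = sorted(int(c) for c in str(abs(num)))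
--     smallest = digits[0]
--     largest = digits[-1]
--     str1 = f"the largest digit in {num} is {largest}"
--     str2 = f"the smallest digit in {num} is {smallest}"
--     return str1, str2
-- ===== Notes on version B (the rewrite author's own statement) =====
-- stated objective: simpler
-- what changed: Replaces the running min/max tracking loop with sorting the digit list once and taking its first and last element.
import Mathlib
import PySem

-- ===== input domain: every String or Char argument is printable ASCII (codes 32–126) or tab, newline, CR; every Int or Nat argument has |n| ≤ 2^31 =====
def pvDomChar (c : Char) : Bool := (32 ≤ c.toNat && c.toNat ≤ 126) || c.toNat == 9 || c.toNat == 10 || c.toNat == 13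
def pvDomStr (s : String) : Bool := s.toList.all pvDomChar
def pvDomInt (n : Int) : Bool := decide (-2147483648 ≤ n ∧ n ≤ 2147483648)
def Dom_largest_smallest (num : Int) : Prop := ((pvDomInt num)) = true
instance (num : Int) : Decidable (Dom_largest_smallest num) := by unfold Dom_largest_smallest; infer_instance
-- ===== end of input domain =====

-- B sorts the digit list once and reads its first/last element instead of A's running min/max loop (objective: simpler).

-- int(c) for a single character c; exact here: both ports apply it only to the digit characters of str(abs(num))
def pyIntChar (c : Char) : Int := (PySem.Int.ofChars? [c]).getD 0

-- ===== PORT A =====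
def largest_smallest (num : Int) : String × String :=
  match PySem.Int.toChars |num| with
  | [] => ("", "")  -- unreachable: str(abs(num)) is never empty (Python would raise IndexError)
  | c :: rest =>
    let p := rest.foldl (fun (p : Int × Int) i =>
      let l := if p.1 < pyIntChar i then pyIntChar i else p.1
      let s := if p.2 > pyIntChar i then pyIntChar i else p.2
      (l, s)) (pyIntChar c, pyIntChar c)
    ("the largest digit in " ++ PySem.Int.toStr num ++ " is " ++ PySem.Int.toStr p.1,
     "the smallest digit in " ++ PySem.Int.toStr num ++ " is " ++ PySem.Int.toStr p.2)

-- ===== PORT B =====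
def largest_smallest_alt (num : Int) : String × String :=
  match PySem.List.sorted ((PySem.Int.toChars |num|).map pyIntChar) (fun x => x) false with
  | [] => ("", "")  -- unreachable: str(abs(num)) is never empty (Python would raise IndexError)
  | d :: t =>
    ("the largest digit in " ++ PySem.Int.toStr num ++ " is " ++ PySem.Int.toStr ((d :: t).getLast (by simp)),
     "the smallest digit in " ++ PySem.Int.toStr num ++ " is " ++ PySem.Int.toStr d)

-- ===== PRECONDITION & SPEC =====
def Spec_largest_smallest (num : Int) (out : String × String) : Prop := out = largest_smallest_alt num
instance (num : Int) (out : String × String) : Decidable (Spec_largest_smallest num out) := by unfold Spec_largest_smallest; infer_instance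

-- ===== CLAIM (what is proved, stated in full; the proofs are below) =====
def Claim_equal_largest_smallest : Prop := ∀ (num : Int), Dom_largest_smallest num → Spec_largest_smallest num (largest_smallest num)

-- ===== LEMMAS AND PROOFS =====

-- A's pair-accumulator loop is the running max in the first component and the running min in the second
theorem pairFold_eq_max_min (xs : List Char) (a b : Int) :
    xs.foldl (fun (p : Int × Int) i =>
      ((if p.1 < pyIntChar i then pyIntChar i else p.1),
       (if p.2 > pyIntChar i then pyIntChar i else p.2))) (a, b)
      = (xs.foldl (fun m i => max m (pyIntChar i)) a, xs.foldl (fun m i => min m (pyIntChar i)) b) := by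
  induction xs generalizing a b with
  | nil => rfl
  | cons x xs ih =>
      simp only [List.foldl_cons]
      rw [ih]
      have h1 : (if a < pyIntChar x then pyIntChar x else a) = max a (pyIntChar x) := by
        split <;> omega
      have h2 : (if b > pyIntChar x then pyIntChar x else b) = min b (pyIntChar x) := by
        split <;> omega
      rw [h1, h2]

-- the head of sorted(L) for nonempty L = x :: xs is the running min
theorem sorted_head_eq_foldl_min (x d : Int) (xs t : List Int)
    (h : PySem.List.sorted (x :: xs) (fun y => y) false = d :: t) :
    d = xs.foldl min x := by
  have hmemL : xs.foldl min x ∈ x :: xs := by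
    rcases PySem.List.foldl_min_mem xs x with h' | h'
    · simp [h']
    · simp [h']
  have hd_le : d ≤ xs.foldl min x := PySem.List.key_head_sorted_le _ _ h _ hmemL
  have hd_mem : d ∈ x :: xs := by
    have : d ∈ PySem.List.sorted (x :: xs) (fun y => y) false := by rw [h]; simp
    exact (PySem.List.mem_sorted _ _ _ _).1 this
  have hle : xs.foldl min x ≤ d := by
    rcases List.mem_cons.1 hd_mem with h' | h'
    · rw [h']; exact (PySem.List.foldl_min_le xs x).1
    · exact (PySem.List.foldl_min_le xs x).2 _ h'
  omega

-- the last element of sorted(L) for nonempty L = x :: xs is the running max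
theorem sorted_last_eq_foldl_max (x d : Int) (xs t : List Int)
    (h : PySem.List.sorted (x :: xs) (fun y => y) false = d :: t)
    (hne : (d :: t : List Int) ≠ []) :
    (d :: t).getLast hne = xs.foldl max x := by
  have hM_memL : xs.foldl max x ∈ x :: xs := by
    rcases PySem.List.foldl_max_mem xs x with h' | h'
    · simp [h']
    · simp [h']
  have hlast_mem : (d :: t).getLast hne ∈ x :: xs := by
    have hm : (d :: t).getLast hne ∈ PySem.List.sorted (x :: xs) (fun y => y) false := by
      rw [h]; exact List.getLast_mem hne
    exact (PySem.List.mem_sorted _ _ _ _).1 hm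
  have h1 : (d :: t).getLast hne ≤ xs.foldl max x := by
    rcases List.mem_cons.1 hlast_mem with h' | h'
    · rw [h']; exact (PySem.List.le_foldl_max xs x).1
    · exact (PySem.List.le_foldl_max xs x).2 _ h'
  have h2 : xs.foldl max x ≤ (d :: t).getLast hne := by
    have hM_mem : xs.foldl max x ∈ PySem.List.sorted (x :: xs) (fun y => y) false :=
      (PySem.List.mem_sorted _ _ _ _).2 hM_memL
    rw [h] at hM_mem
    rcases List.mem_iff_getElem.1 hM_mem with ⟨p, hp, hpe⟩
    have hlen : (PySem.List.sorted (x :: xs) (fun y => y)).length = (d :: t).length := by rw [h]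
    have hmono := PySem.List.key_sorted_getElem_mono (x :: xs) (fun y => y)
      (p := p) (q := (d :: t).length - 1) (by omega) (by omega)
    simp only [h] at hmono
    rw [List.getLast_eq_getElem]
    simpa [hpe] using hmono
  omega

-- ===== VERDICT (by name: the statement is the Claim_ definition above) =====
theorem largest_smallest_spec : Claim_equal_largest_smallest := by
  intro num _
  unfold Spec_largest_smallest largest_smallest largest_smallest_alt
  cases hc : PySem.Int.toChars |num| with
  | nil =>
      have hnil : PySem.List.sorted (([] : List Char).map pyIntChar) (fun x => x) false = [] :=
        (PySem.List.sorted_eq_nil_iff _ _ _).2 (by simp)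
      rw [hnil]
  | cons c rest =>
      simp only [List.map_cons]
      cases hs : PySem.List.sorted (pyIntChar c :: rest.map pyIntChar) (fun x => x) false with
      | nil => exact absurd ((PySem.List.sorted_eq_nil_iff _ _ _).1 hs) (by simp)
      | cons d t =>
          have hmin := sorted_head_eq_foldl_min _ d _ t hs
          have hmax := sorted_last_eq_foldl_max _ d _ t hs (by simp)
          rw [List.foldl_map] at hmin hmax
          simp only [pairFold_eq_max_min]
          rw [← hmax, ← hmin]
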